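-- pv_equiv track=rewrite | github.com/elite3312/leet_code_practice | solutions/other/2024_ocean_cup/formal/I_Symmetrical_Puzzles.py | most_upper_left_coordinate
-- ===== SOURCE A (Python) =====
-- def most_upper_left_coordinate(points):
--     """
--     Finds the most upper-left coordinate from a list of 2D coordinates.
--
--     Parameters:
--         points (list of tuple): List of (x, y) coordinates.
--
--     Returns:
--         tuple: The most upper-left coordinate.
--     """
--     if not points:
--         return None
--
--     # Initialize with the first point
--     upper_left = points[0]
--
--     for point in points:
--         x, y = point
--         ul_x, ul_y = upper_left
--
--         # Check if this point is more upper or (in case of tie) more left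
--         if (y < ul_y) or (y == ul_y and x < ul_x):
--             upper_left = point
--
--     return upper_left
-- ===== SOURCE B (Python) =====
-- def most_upper_left_coordinate(points):
--     """Most upper-left coordinate: min y, ties broken by min x (first among ties)."""
--     if not points:
--         return None
--     return sorted(points, key=lambda p: (p[1], p[0]))[0]
-- ===== Notes on version B (the rewrite author's own statement) =====
-- stated objective: simpler
-- what changed: Replaces the explicit running-minimum loop with sort-by-(y,x)-then-take-first; Python's stable sort preserves A's first-among-ties behaviour.
import Mathlib
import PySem

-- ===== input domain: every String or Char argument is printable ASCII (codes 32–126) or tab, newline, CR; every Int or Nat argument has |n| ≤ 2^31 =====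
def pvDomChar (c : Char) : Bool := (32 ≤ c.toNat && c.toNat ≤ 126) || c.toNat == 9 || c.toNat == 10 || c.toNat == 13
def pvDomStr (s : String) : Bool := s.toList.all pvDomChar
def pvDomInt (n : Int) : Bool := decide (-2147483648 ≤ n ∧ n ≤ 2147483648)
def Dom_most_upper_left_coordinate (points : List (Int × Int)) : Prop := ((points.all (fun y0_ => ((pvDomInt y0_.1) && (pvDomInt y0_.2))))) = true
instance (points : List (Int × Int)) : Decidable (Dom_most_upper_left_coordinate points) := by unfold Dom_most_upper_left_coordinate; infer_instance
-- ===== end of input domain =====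

-- B replaces A's explicit running-minimum loop with sort-by-(y,x)-then-take-first (simpler; stable sort keeps A's first-among-ties result).

-- ===== PORT A =====
-- A: if empty return None; running minimum over the list, updated when (y < ul_y) or (y == ul_y and x < ul_x).
def most_upper_left_coordinate (points : List (Int × Int)) : Option (Int × Int) :=
  match points with
  | [] => none
  | p0 :: _ =>
    some (points.foldl
      (fun upper_left point =>
        if point.2 < upper_left.2 ∨ (point.2 = upper_left.2 ∧ point.1 < upper_left.1)
        then point else upper_left) p0)

-- ===== PORT B =====
-- B: sorted(points, key=lambda p: (p[1], p[0]))[0] — sorted2 is PySem's sorted with a tuple key, [0] is pyGet? at 0.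
def most_upper_left_coordinate_alt (points : List (Int × Int)) : Option (Int × Int) :=
  if points = [] then none
  else PySem.List.pyGet? (PySem.List.sorted2 points (fun p => p.2) (fun p => p.1)) 0

-- ===== PRECONDITION & SPEC =====
def Spec_most_upper_left_coordinate (points : List (Int × Int)) (out : Option (Int × Int)) : Prop := out = most_upper_left_coordinate_alt points
instance (points : List (Int × Int)) (out : Option (Int × Int)) : Decidable (Spec_most_upper_left_coordinate points out) := by unfold Spec_most_upper_left_coordinate; infer_instance

-- ===== CLAIM (what is proved, stated in full; the proofs are below) =====
def Claim_equal_most_upper_left_coordinate : Prop := ∀ (points : List (Int × Int)), Dom_most_upper_left_coordinate points → Spec_most_upper_left_coordinate points (most_upper_left_coordinate points)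

-- ===== LEMMAS AND PROOFS =====

-- The lexicographic 'before' test used by sorted2 with keys (snd, fst).
def pvBefore (a b : Int × Int) : Bool :=
  decide (a.2 < b.2) || (!decide (b.2 < a.2) && decide (a.1 < b.1))

-- head? of a left fold of insertBy into a nonempty accumulator is the running minimum of the heads.
theorem head_foldl_insertBy (xs : List (Int × Int)) :
    ∀ (m : Int × Int) (r : List (Int × Int)),
      (xs.foldl (fun acc x => PySem.List.insertBy pvBefore x acc) (m :: r)).head? =
        some (xs.foldl (fun m y => if pvBefore y m then y else m) m) := by
  induction xs with
  | nil => intro m r; rfl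
  | cons y ys ih =>
    intro m r
    simp only [List.foldl_cons, PySem.List.insertBy]
    by_cases h : pvBefore y m
    · simp [h, ih]
    · simp [h, ih]

-- A's update function coincides with the 'if before then take new' update.
theorem update_eq (m y : Int × Int) :
    (if y.2 < m.2 ∨ (y.2 = m.2 ∧ y.1 < m.1) then y else m) =
      (if pvBefore y m then y else m) := by
  unfold pvBefore
  split_ifs with h1 h2 h2 <;> simp_all <;> omega

-- ===== VERDICT (by name: the statement is the Claim_ definition above) =====
theorem most_upper_left_coordinate_spec : Claim_equal_most_upper_left_coordinate := by
  intro points _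
  unfold Spec_most_upper_left_coordinate most_upper_left_coordinate most_upper_left_coordinate_alt
  match points with
  | [] => rfl
  | p0 :: rest =>
    rw [if_neg (by simp : ¬(p0 :: rest = []))]
    show some ((p0 :: rest).foldl
      (fun upper_left point =>
        if point.2 < upper_left.2 ∨ (point.2 = upper_left.2 ∧ point.1 < upper_left.1)
        then point else upper_left) p0) = _
    have hs : PySem.List.sorted2 (p0 :: rest) (fun p => p.2) (fun p => p.1) =
        (p0 :: rest).foldl (fun acc x => PySem.List.insertBy pvBefore x acc) [] := by
      unfold PySem.List.sorted2 pvBefore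
      rfl
    have hupd : ∀ (m y : Int × Int),
        (if y.2 < m.2 ∨ (y.2 = m.2 ∧ y.1 < m.1) then y else m) =
          (if pvBefore y m then y else m) := update_eq
    have hA : (p0 :: rest).foldl
        (fun upper_left point =>
          if point.2 < upper_left.2 ∨ (point.2 = upper_left.2 ∧ point.1 < upper_left.1)
          then point else upper_left) p0 =
        rest.foldl (fun m y => if pvBefore y m then y else m) p0 := by
      simp only [List.foldl_cons]
      rw [show (if p0.2 < p0.2 ∨ (True ∧ p0.1 < p0.1) then p0 else p0) = p0 by simp]
      rw [show (fun (upper_left point : Int × Int) =>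
          if point.2 < upper_left.2 ∨ (point.2 = upper_left.2 ∧ point.1 < upper_left.1)
          then point else upper_left) =
          (fun m y => if pvBefore y m then y else m) from funext fun m => funext fun y => hupd m y]
    have hB : PySem.List.pyGet?
        (PySem.List.sorted2 (p0 :: rest) (fun p => p.2) (fun p => p.1)) 0 =
        some (rest.foldl (fun m y => if pvBefore y m then y else m) p0) := by
      rw [hs]
      simp only [List.foldl_cons, PySem.List.insertBy]
      rw [show PySem.List.pyGet?
          (rest.foldl (fun acc x => PySem.List.insertBy pvBefore x acc) [p0]) 0 =
          (rest.foldl (fun acc x => PySem.List.insertBy pvBefore x acc) [p0]).head? from by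
        simp [PySem.List.pyGet?, PySem.List.pyIdx?]
        cases hh : (rest.foldl (fun acc x => PySem.List.insertBy pvBefore x acc) [p0]) <;> simp]
      exact head_foldl_insertBy rest p0 []
    rw [hA, hB]
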